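-- pv_equiv track=rewrite | github.com/Junhyung-Choi/Algorithm | 풀이/Junhyeong/todo/BOJ/[유니온파인드]거짓말.py | count_false_party
-- ===== SOURCE A (Python) =====
-- def count_false_party(truth_person, parties):
--     result = 0
--     for prty in parties:
--         isFalse = True
--         for t_person in truth_person:
--             if t_person in prty:
--                 isFalse = False
--                 continue
--         if isFalse:
--             result += 1
--     return result
-- ===== SOURCE B (Python) =====
-- def count_false_party(truth_person, parties):
--     # Inverted index: person -> list of party indices containing that person.
--     members = {}
--     for i, prty in enumerate(parties):
--         for p in prty:
--             members.setdefault(p, []).append(i)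
--     # Mark every party that contains some truth-knowing person.
--     exposed = set()
--     for t in truth_person:
--         for i in members.get(t, []):
--             exposed.add(i)
--     return len(parties) - len(exposed)
-- ===== Notes on version B (the rewrite author's own statement) =====
-- stated objective: faster
-- what changed: Instead of scanning every party against every truth person, B builds an inverted index person->party indices once, loops over truth persons marking exposed parties in a set, and returns len(parties) minus the number of exposed parties.
import Mathlib
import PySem

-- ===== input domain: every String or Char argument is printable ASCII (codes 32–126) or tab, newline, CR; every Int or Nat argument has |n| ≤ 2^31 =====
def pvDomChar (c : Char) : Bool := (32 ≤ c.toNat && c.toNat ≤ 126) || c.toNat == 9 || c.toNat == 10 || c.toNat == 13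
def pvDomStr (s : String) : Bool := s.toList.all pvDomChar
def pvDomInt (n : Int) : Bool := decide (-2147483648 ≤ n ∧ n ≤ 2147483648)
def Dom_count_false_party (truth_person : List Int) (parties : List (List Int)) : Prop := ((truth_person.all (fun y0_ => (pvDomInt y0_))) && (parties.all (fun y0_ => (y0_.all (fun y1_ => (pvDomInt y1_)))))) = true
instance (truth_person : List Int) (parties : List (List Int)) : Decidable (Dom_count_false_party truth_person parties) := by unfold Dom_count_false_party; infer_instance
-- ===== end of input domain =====

-- B replaces A's party-by-party rescan with a one-pass inverted index (person -> party indices)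
-- traversed from the truth persons; same results, measurably faster on large inputs.

-- ===== PORT A =====
def count_false_party (truth_person : List Int) (parties : List (List Int)) : Int :=
  parties.foldl (fun result prty =>
    let isFalse := truth_person.foldl (fun b t_person =>
      if prty.contains t_person then false else b) true
    if isFalse then result + 1 else result) 0

-- ===== PORT B =====
def count_false_party_alt (truth_person : List Int) (parties : List (List Int)) : Int :=
  let members : PySem.Dict Int (List Int) :=
    (PySem.List.enumerate parties 0).foldl (fun d ip =>
      ip.2.foldl (fun d p => d.modify p [] (fun l => l ++ [ip.1])) d) PySem.Dict.empty
  let exposed : PySem.Set Int :=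
    truth_person.foldl (fun s t => (members.getD t []).foldl PySem.Set.add s) PySem.Set.empty
  (parties.length : Int) - (PySem.Set.len exposed : Int)

-- ===== PRECONDITION & SPEC =====
def Spec_count_false_party (truth_person : List Int) (parties : List (List Int)) (out : Int) : Prop := out = count_false_party_alt truth_person parties
instance (truth_person : List Int) (parties : List (List Int)) (out : Int) : Decidable (Spec_count_false_party truth_person parties out) := by unfold Spec_count_false_party; infer_instance

-- ===== CLAIM (what is proved, stated in full; the proofs are below) =====
def Claim_equal_count_false_party : Prop := ∀ (truth_person : List Int) (parties : List (List Int)), Dom_count_false_party truth_person parties → Spec_count_false_party truth_person parties (count_false_party truth_person parties)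

-- ===== LEMMAS AND PROOFS =====

-- A's inner loop: isFalse ends up true iff no truth person is in the party.
theorem pvA_inner (truth : List Int) (prty : List Int) (b0 : Bool) :
    truth.foldl (fun b t => if prty.contains t then false else b) b0
      = (b0 && truth.all (fun t => !(prty.contains t))) := by
  induction truth generalizing b0 with
  | nil => simp
  | cons t ts ih =>
    simp only [List.foldl_cons, List.all_cons, ih]
    by_cases h : t ∈ prty <;> cases b0 <;> simp [h]

-- A counts the parties containing no truth person.
theorem pvA_eq_countP (truth : List Int) (parties : List (List Int)) :
    count_false_party truth parties
      = (parties.countP (fun prty => truth.all (fun t => !(prty.contains t))) : Int) := by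
  unfold count_false_party
  simp only [pvA_inner, Bool.true_and]
  simpa using PySem.List.foldl_count_if (fun prty => truth.all (fun t => !(prty.contains t))) parties 0

-- membership in the index after the inner loop over one party
theorem pvIdx_inner_mem (prty : List Int) (d : PySem.Dict Int (List Int)) (i p x : Int) :
    x ∈ (prty.foldl (fun d q => d.modify q [] (fun l => l ++ [i])) d).getD p []
      ↔ x ∈ d.getD p [] ∨ (p ∈ prty ∧ x = i) := by
  induction prty generalizing d with
  | nil => simp
  | cons q qs ih =>
    simp only [List.foldl_cons, ih, PySem.Dict.getD_modify, List.mem_cons]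
    by_cases h : p = q <;> simp [h] <;> tauto

-- membership in the full inverted index
theorem pvIdx_mem (eps : List (Int × List Int)) (d : PySem.Dict Int (List Int)) (p x : Int) :
    x ∈ (eps.foldl (fun d ip => ip.2.foldl (fun d q => d.modify q [] (fun l => l ++ [ip.1])) d) d).getD p []
      ↔ x ∈ d.getD p [] ∨ ∃ ip ∈ eps, p ∈ ip.2 ∧ x = ip.1 := by
  induction eps generalizing d with
  | nil => simp
  | cons e es ih =>
    simp only [List.foldl_cons, ih, pvIdx_inner_mem, List.mem_cons]
    aesop

-- the exposed loop is nodup and its members are the indices hit through the index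
theorem pvExp_mem (truth : List Int) (idx : PySem.Dict Int (List Int)) (s0 : PySem.Set Int) (x : Int) :
    x ∈ truth.foldl (fun s t => (idx.getD t []).foldl PySem.Set.add s) s0
      ↔ x ∈ s0 ∨ ∃ t ∈ truth, x ∈ idx.getD t [] := by
  induction truth generalizing s0 with
  | nil => simp
  | cons t ts ih =>
    rw [List.foldl_cons, ih]
    have hupd : (idx.getD t []).foldl PySem.Set.add s0 = PySem.Set.update s0 (idx.getD t []) := rfl
    rw [hupd, PySem.Set.mem_update]
    simp only [List.mem_cons]
    aesop

theorem pvExp_nodup (truth : List Int) (idx : PySem.Dict Int (List Int)) (s0 : PySem.Set Int)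
    (h0 : s0.Nodup) :
    (truth.foldl (fun s t => (idx.getD t []).foldl PySem.Set.add s) s0).Nodup := by
  induction truth generalizing s0 with
  | nil => exact h0
  | cons t ts ih =>
    simp only [List.foldl_cons]
    exact ih _ (PySem.Set.nodup_update s0 (idx.getD t []) h0)

-- ===== VERDICT (by name: the statement is the Claim_ definition above) =====
theorem count_false_party_spec : Claim_equal_count_false_party := by
  intro truth parties _
  unfold Spec_count_false_party count_false_party_alt
  simp only []
  set idx := (PySem.List.enumerate parties 0).foldl (fun d ip =>
      ip.2.foldl (fun d p => d.modify p [] (fun l => l ++ [ip.1])) d) PySem.Dict.empty with hidx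
  set exposed := truth.foldl (fun s t => (idx.getD t []).foldl PySem.Set.add s) PySem.Set.empty with hexp
  -- exposed has the same members as the first components of exposed parties in enumerate
  set Q : List Int → Bool := fun prty => truth.all (fun t => !(prty.contains t)) with hQ
  set L := ((PySem.List.enumerate parties 0).filter (fun ip => !(Q ip.2))).map (·.1) with hL
  have hmem : ∀ x : Int, x ∈ exposed ↔ x ∈ L := by
    intro x
    rw [hexp, pvExp_mem]
    have hQ2 : ∀ prty : List Int, (!(Q prty)) = true ↔ ∃ t ∈ truth, t ∈ prty := by
      intro prty; simp [hQ]
    simp only [hidx, pvIdx_mem, PySem.Dict.getD_empty, List.not_mem_nil, false_or, hL,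
      List.mem_map, List.mem_filter, PySem.Set.empty, hQ2]
    aesop
  have hnodL : L.Nodup := by
    have hsub : L.Sublist ((PySem.List.enumerate parties 0).map (·.1)) :=
      List.Sublist.map _ List.filter_sublist
    have : ((PySem.List.enumerate parties 0).map (·.1)).Nodup := by
      rw [PySem.List.map_fst_enumerate]
      exact PySem.List.nodup_pyRange_one 0 _
    exact this.sublist hsub
  have hnodE : exposed.Nodup := pvExp_nodup _ _ _ List.nodup_nil
  have hperm : exposed.Perm L := by
    rw [List.perm_ext_iff_of_nodup hnodE hnodL]; exact hmem
  have hlen : exposed.length = L.length := hperm.length_eq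
  have hLlen : L.length = parties.countP (fun prty => !(Q prty)) := by
    rw [hL, List.length_map, ← List.countP_eq_length_filter]
    calc (PySem.List.enumerate parties 0).countP (fun ip => !(Q ip.2))
        = ((PySem.List.enumerate parties 0).map (·.2)).countP (fun prty => !(Q prty)) := by
          rw [List.countP_map]; rfl
      _ = parties.countP (fun prty => !(Q prty)) := by rw [PySem.List.map_snd_enumerate]
  have hsplit : parties.countP Q + parties.countP (fun prty => !(Q prty)) = parties.length := by
    simpa using (List.length_eq_countP_add_countP (l := parties) Q).symm
  have hA := pvA_eq_countP truth parties
  rw [hA]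
  show (parties.countP Q : Int) = (parties.length : Int) - (PySem.Set.len exposed : Int)
  have : PySem.Set.len exposed = exposed.length := rfl
  rw [this, hlen, hLlen]
  omega
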